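-- pv_equiv track=rewrite | github.com/fangyi-zhou/advent-of-code | 2025/vibe-coded-aoc/solutions/day2.py | _generate_repeated_numbers_up_to
-- ===== SOURCE A (Python) =====
-- from typing import List, Tuple
--
-- def _generate_repeated_numbers_up_to(max_value: int) -> List[int]:
--     # generate all numbers that are two copies of the same digit-sequence (no leading zeros)
--     if max_value < 11:
--         return []
--     result: List[int] = []
--     max_len = len(str(max_value))
--     # total length must be even: 2*k
--     for k in range(1, max_len // 2 + 1):
--         pow10_k = 10 ** k
--         start = 10 ** (k - 1)
--         end = 10 ** k - 1
--         for left in range(start, end + 1):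
--             n = left * (pow10_k) + left
--             if n > max_value:
--                 break
--             result.append(n)
--     return result
-- ===== SOURCE B (Python) =====
-- def _generate_repeated_numbers_up_to(max_value):
--     # Closed form: a doubled number with a k-digit left half l equals
--     # l*(10**k+1), so the set of valid left halves is exactly range(1, stop)
--     # where stop is computed arithmetically from the digit count of
--     # max_value -- no trial-and-break enumeration at all.
--     if max_value < 11:
--         return []
--     d = len(str(max_value))
--     k = d // 2
--     if d % 2 == 1:
--         # every doubled number with <= 2*k digits is < 10**(d-1) <= max_value
--         stop = 10 ** k
--     else:
--         # in the top block, l fits iff l <= max_value // (10**k + 1)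
--         stop = max(10 ** (k - 1), max_value // (10 ** k + 1) + 1)
--     return [l * 10 ** len(str(l)) + l for l in range(1, stop)]
-- ===== Notes on version B (the rewrite author's own statement) =====
-- stated objective: alternative
-- what changed: Replaces A's nested trial-and-break enumeration (per digit-length blocks, appending each candidate until one exceeds max_value) by a closed form: the count of valid left halves is computed arithmetically from the digit count of max_value (and one floor division by 10**k+1 in the even-digit case), and the whole result is emitted as a single comprehension over range(1, stop).
import Mathlib
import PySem

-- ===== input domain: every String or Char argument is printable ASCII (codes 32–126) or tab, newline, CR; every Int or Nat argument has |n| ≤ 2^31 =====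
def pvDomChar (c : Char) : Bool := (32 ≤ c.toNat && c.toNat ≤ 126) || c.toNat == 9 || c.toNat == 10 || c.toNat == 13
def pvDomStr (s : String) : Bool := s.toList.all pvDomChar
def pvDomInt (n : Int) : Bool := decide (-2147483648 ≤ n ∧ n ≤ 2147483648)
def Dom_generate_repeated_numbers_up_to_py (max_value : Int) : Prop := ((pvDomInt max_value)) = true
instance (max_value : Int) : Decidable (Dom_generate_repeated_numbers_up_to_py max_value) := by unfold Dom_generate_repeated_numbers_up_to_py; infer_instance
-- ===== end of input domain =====

-- B replaces A's trial-and-break enumeration by a closed form: it computes the exact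
-- number of valid left halves arithmetically from the digit count of max_value and
-- emits the whole answer as one comprehension (objective: simpler).

-- ===== PORT A =====
-- inner 'for left in range(start, end + 1)' with its break, appending n while n <= max_value
def pyAInner (maxv pk : Int) (acc : List Int) : List Int → List Int
  | [] => acc
  | l :: ls =>
      let n := l * pk + l
      if n > maxv then acc else pyAInner maxv pk (acc ++ [n]) ls

def generate_repeated_numbers_up_to_py (max_value : Int) : List Int :=
  if max_value < 11 then []
  else
    let max_len : Int := PySem.Str.len (PySem.Int.toStr max_value)
    (PySem.List.pyRange 1 (PySem.Int.floordiv max_len 2 + 1) 1).foldl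
      (fun result k =>
        let pow10_k : Int := (10 : Int) ^ k.toNat          -- 10 ** k, k ≥ 1 here
        let start : Int := (10 : Int) ^ (k - 1).toNat      -- 10 ** (k - 1)
        let e : Int := (10 : Int) ^ k.toNat - 1            -- end = 10 ** k - 1
        pyAInner max_value pow10_k result (PySem.List.pyRange start (e + 1) 1))
      []

-- ===== PORT B =====
def generate_repeated_numbers_up_to_py_alt (max_value : Int) : List Int :=
  if max_value < 11 then []
  else
    let d : Int := PySem.Str.len (PySem.Int.toStr max_value)
    let k : Int := PySem.Int.floordiv d 2
    let stop : Int :=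
      if PySem.Int.mod d 2 = 1 then (10 : Int) ^ k.toNat
      else max ((10 : Int) ^ (k - 1).toNat)
               (PySem.Int.floordiv max_value ((10 : Int) ^ k.toNat + 1) + 1)
    (PySem.List.pyRange 1 stop 1).map
      (fun l => l * (10 : Int) ^ (PySem.Str.len (PySem.Int.toStr l)).toNat + l)

-- ===== PRECONDITION & SPEC =====
def Spec_generate_repeated_numbers_up_to_py (max_value : Int) (out : List Int) : Prop := out = generate_repeated_numbers_up_to_py_alt max_value
instance (max_value : Int) (out : List Int) : Decidable (Spec_generate_repeated_numbers_up_to_py max_value out) := by unfold Spec_generate_repeated_numbers_up_to_py; infer_instance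

-- ===== CLAIM (what is proved, stated in full; the proofs are below) =====
def Claim_equal_generate_repeated_numbers_up_to_py : Prop := ∀ (max_value : Int), Dom_generate_repeated_numbers_up_to_py max_value → Spec_generate_repeated_numbers_up_to_py max_value (generate_repeated_numbers_up_to_py max_value)

-- ===== LEMMAS AND PROOFS =====

-- the doubled number built from left half l (l ≥ 1): l followed by l in decimal
def pvRepF (l : Int) : Int := l * 10 ^ (Nat.log 10 l.toNat + 1) + l

lemma pvRepF_big (l : Int) (hl : 1 ≤ l) : 11 * l ≤ pvRepF l := by
  have h : (10 : Int) ≤ 10 ^ (Nat.log 10 l.toNat + 1) := by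
    calc (10 : Int) = 10 ^ 1 := by ring
    _ ≤ 10 ^ (Nat.log 10 l.toNat + 1) := by
        apply pow_le_pow_right₀ (by norm_num) (by omega)
  unfold pvRepF; nlinarith

lemma pvStopEx (maxv : Int) : ∃ n : ℕ, maxv < pvRepF ((n : Int) + 1) := by
  refine ⟨maxv.toNat, ?_⟩
  have h1 : (1 : Int) ≤ (maxv.toNat : Int) + 1 := by omega
  have := pvRepF_big ((maxv.toNat : Int) + 1) h1
  have h2 : maxv ≤ (maxv.toNat : Int) := Int.self_le_toNat maxv
  omega

-- least l ≥ 1 with pvRepF l > maxv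
def pvStop (maxv : Int) : Int := (Nat.find (pvStopEx maxv) : Int) + 1

lemma pvStop_pos (maxv : Int) : 1 ≤ pvStop maxv := by unfold pvStop; omega

lemma pvStop_spec (maxv : Int) : maxv < pvRepF (pvStop maxv) := Nat.find_spec (pvStopEx maxv)

lemma pvStop_min (maxv : Int) (l : Int) (h1 : 1 ≤ l) (h2 : l < pvStop maxv) : pvRepF l ≤ maxv := by
  have h3 : l.toNat - 1 < Nat.find (pvStopEx maxv) := by unfold pvStop at h2; omega
  have h4 := Nat.find_min (pvStopEx maxv) h3
  have h5 : ((l.toNat - 1 : ℕ) : Int) + 1 = l := by omega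
  rw [h5] at h4; omega

-- pvRepF in terms of an explicit power when the digit count of l is known
lemma pvRepF_eq (j : ℕ) (l : Int) (h1 : (10 : Int) ^ j ≤ l) (h2 : l < (10 : Int) ^ (j + 1)) :
    pvRepF l = l * 10 ^ (j + 1) + l := by
  have hn1 : (10 : ℕ) ^ j ≤ l.toNat := by
    have : ((10 : ℕ) ^ j : Int) ≤ l := by push_cast; exact h1
    omega
  have hn2 : l.toNat < (10 : ℕ) ^ (j + 1) := by
    have : l < ((10 : ℕ) ^ (j + 1) : Int) := by push_cast; exact h2
    omega
  unfold pvRepF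
  rw [Nat.log_eq_of_pow_le_of_lt_pow hn1 hn2]

lemma pvRepF_lt_succ (l : Int) (hl : 1 ≤ l) : pvRepF l < pvRepF (l + 1) := by
  set d := Nat.log 10 l.toNat with hd
  have hz : l.toNat ≠ 0 := by omega
  have h1n : (10 : ℕ) ^ d ≤ l.toNat := Nat.pow_log_le_self 10 hz
  have h2n : l.toNat < (10 : ℕ) ^ (d + 1) := Nat.lt_pow_succ_log_self (by norm_num) l.toNat
  have hl0 : ((l.toNat : Int)) = l := Int.toNat_of_nonneg (by omega)
  have h1 : (10 : Int) ^ d ≤ l := by rw [← hl0]; exact_mod_cast h1n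
  have h2 : l < (10 : Int) ^ (d + 1) := by rw [← hl0]; exact_mod_cast h2n
  by_cases hb : l + 1 < (10 : Int) ^ (d + 1)
  · rw [pvRepF_eq d l h1 h2, pvRepF_eq d (l + 1) (by linarith) hb]
    have hP : (0 : Int) < 10 ^ (d + 1) := by positivity
    nlinarith
  · have hb' : l + 1 = (10 : Int) ^ (d + 1) := le_antisymm (by linarith) (not_lt.mp hb)
    rw [pvRepF_eq d l h1 h2,
      pvRepF_eq (d + 1) (l + 1) (by rw [hb']) (by rw [hb']; exact pow_lt_pow_right₀ (by norm_num) (by omega))]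
    have hP : (0 : Int) < 10 ^ (d + 1) := by positivity
    have hQ : (10 : Int) ^ (d + 1 + 1) = 10 * 10 ^ (d + 1) := by ring
    nlinarith

lemma pvRepF_mono (l l' : Int) (h1 : 1 ≤ l) (h2 : l ≤ l') : pvRepF l ≤ pvRepF l' := by
  induction l', h2 using Int.le_induction with
  | base => exact le_refl _
  | succ n hn ih => exact le_trans ih (le_of_lt (pvRepF_lt_succ n (by omega)))

-- a value below the stopping point does not exceed maxv
lemma lt_pvStop_of_le (maxv l : Int) (_h1 : 1 ≤ l) (hle : pvRepF l ≤ maxv) : l < pvStop maxv := by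
  by_contra h
  push Not at h
  have hm := pvRepF_mono (pvStop maxv) l (pvStop_pos maxv) h
  have hs := pvStop_spec maxv
  omega

lemma pvStop_eq_of (maxv a : Int) (h1 : 1 ≤ a) (h2 : a ≤ pvStop maxv) (h3 : maxv < pvRepF a) :
    a = pvStop maxv := by
  by_contra hne
  have : a < pvStop maxv := lt_of_le_of_ne h2 hne
  have := pvStop_min maxv a h1 this
  omega

-- ==== A characterised ====
lemma lemAInner (maxv : Int) : ∀ (cnt j : ℕ) (a pk : Int) (acc : List Int),
    pk = (10 : Int) ^ (j + 1) → cnt = ((10 : Int) ^ (j + 1) - a).toNat → (10 : Int) ^ j ≤ a →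
    pyAInner maxv pk acc (PySem.List.pyRange a pk 1) =
      acc ++ (PySem.List.pyRange a (min pk (pvStop maxv)) 1).map pvRepF := by
  intro cnt
  induction cnt with
  | zero =>
    intro j a pk acc hpw hcnt hja
    subst hpw
    have hge : (10 : Int) ^ (j + 1) ≤ a := by omega
    rw [PySem.List.pyRange_one_eq_nil hge,
      PySem.List.pyRange_one_eq_nil (le_trans (min_le_left _ _) hge)]
    simp [pyAInner]
  | succ cnt ih =>
    intro j a pk acc hpw hcnt hja
    subst hpw
    have h1a : 1 ≤ a := le_trans (one_le_pow₀ (by norm_num)) hja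
    by_cases hlt : a < (10 : Int) ^ (j + 1)
    · rw [PySem.List.pyRange_one_cons hlt]
      have hrep : pvRepF a = a * (10 : Int) ^ (j + 1) + a := pvRepF_eq j a hja hlt
      simp only [pyAInner, ← hrep]
      by_cases hgt : maxv < pvRepF a
      · rw [if_pos hgt]
        have hstop : pvStop maxv ≤ a := by
          by_contra hc
          push Not at hc
          have := pvStop_min maxv a h1a hc
          omega
        rw [PySem.List.pyRange_one_eq_nil (le_trans (min_le_right _ _) hstop)]
        simp
      · push Not at hgt
        rw [if_neg (by omega)]
        have hlt' : a < pvStop maxv := lt_pvStop_of_le maxv a h1a hgt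
        rw [ih j (a + 1) _ (acc ++ [pvRepF a]) rfl (by omega) (by omega)]
        rw [PySem.List.pyRange_one_cons (lt_min hlt hlt')]
        simp
    · rw [PySem.List.pyRange_one_eq_nil (by omega),
        PySem.List.pyRange_one_eq_nil (le_trans (min_le_left _ _) (by omega))]
      simp [pyAInner]

lemma mergeRanges (s x y : Int) (h1 : 1 ≤ x) (hxy : x ≤ y) :
    PySem.List.pyRange 1 (min x s) 1 ++ PySem.List.pyRange x (min y s) 1 =
      PySem.List.pyRange 1 (min y s) 1 := by
  by_cases hs : s ≤ x
  · rw [min_eq_right hs, PySem.List.pyRange_one_eq_nil (le_trans (min_le_right _ _) hs)]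
    rw [min_eq_right (le_trans hs hxy)]
    simp
  · push Not at hs
    rw [min_eq_left (le_of_lt hs)]
    exact (PySem.List.pyRange_one_append 1 x (min y s) h1 (le_min hxy (le_of_lt hs))).symm

lemma lemAOuter (maxv : Int) : ∀ (cnt : ℕ) (c K : Int), 1 ≤ c → c ≤ K + 1 → cnt = (K + 1 - c).toNat →
    (PySem.List.pyRange c (K + 1) 1).foldl
      (fun result k =>
        pyAInner maxv ((10 : Int) ^ k.toNat) result
          (PySem.List.pyRange ((10 : Int) ^ (k - 1).toNat) ((10 : Int) ^ k.toNat - 1 + 1) 1))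
      ((PySem.List.pyRange 1 (min ((10 : Int) ^ (c - 1).toNat) (pvStop maxv)) 1).map pvRepF)
    = (PySem.List.pyRange 1 (min ((10 : Int) ^ K.toNat) (pvStop maxv)) 1).map pvRepF := by
  intro cnt
  induction cnt with
  | zero =>
    intro c K hc hcK hcnt
    have hcK' : c = K + 1 := by omega
    rw [show PySem.List.pyRange c (K + 1) 1 = [] from PySem.List.pyRange_one_eq_nil (by omega)]
    simp only [List.foldl_nil]
    rw [show (c - 1) = K by omega]
  | succ cnt ih =>
    intro c K hc hcK hcnt
    have hclt : c < K + 1 := by omega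
    rw [PySem.List.pyRange_one_cons hclt]
    simp only [List.foldl_cons]
    have hct : c.toNat = (c - 1).toNat + 1 := by omega
    rw [show ((10 : Int) ^ c.toNat - 1 + 1) = (10 : Int) ^ c.toNat by ring]
    rw [hct]
    rw [lemAInner maxv ((10 : Int) ^ ((c - 1).toNat + 1) - (10 : Int) ^ (c - 1).toNat).toNat
        ((c - 1).toNat) ((10 : Int) ^ (c - 1).toNat) ((10 : Int) ^ ((c - 1).toNat + 1)) _ rfl rfl (le_refl _)]
    rw [← List.map_append]
    rw [mergeRanges (pvStop maxv) ((10 : Int) ^ (c - 1).toNat) ((10 : Int) ^ ((c - 1).toNat + 1))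
        (one_le_pow₀ (by norm_num)) (pow_le_pow_right₀ (by norm_num) (by omega))]
    have := ih (c + 1) K (by omega) (by omega) (by omega)
    rw [show ((c + 1 - 1).toNat) = (c - 1).toNat + 1 by omega] at this
    exact this

-- length of the decimal digit list of n
lemma tdc_len : ∀ (f n : ℕ) (l : List Char), n < f →
    (Nat.toDigitsCore 10 f n l).length = l.length + Nat.log 10 n + 1 := by
  intro f
  induction f with
  | zero => intro n l hn; omega
  | succ f ih =>
    intro n l hn
    rw [Nat.toDigitsCore]
    by_cases h0 : n / 10 = 0
    · have hn10 : n < 10 := by omega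
      rw [if_pos h0]
      simp [Nat.log_eq_zero_iff.mpr (Or.inl hn10)]
    · rw [if_neg h0]
      have hge : 10 ≤ n := by
        by_contra hc
        exact h0 (Nat.div_eq_of_lt (by omega))
      have hdl : n / 10 < f := by
        have := Nat.div_lt_self (by omega : 0 < n) (by norm_num : 1 < 10)
        omega
      rw [ih (n / 10) (Nat.digitChar (n % 10) :: l) hdl]
      have hlog : Nat.log 10 (n / 10) = Nat.log 10 n - 1 := Nat.log_div_base 10 n
      have hpos : 0 < Nat.log 10 n := Nat.log_pos (by norm_num) hge
      simp only [List.length_cons]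
      omega

lemma toStr_len (n : Int) (h : 1 ≤ n) :
    PySem.Str.len (PySem.Int.toStr n) = (Nat.log 10 n.toNat : Int) + 1 := by
  rw [PySem.Str.len_eq, PySem.Int.toList_toStr]
  unfold PySem.Int.toChars
  rw [if_neg (by omega)]
  unfold Nat.toDigits
  rw [tdc_len (n.toNat + 1) n.toNat [] (by omega)]
  simp

lemma A_eq (maxv : Int) (h : ¬ maxv < 11) :
    generate_repeated_numbers_up_to_py maxv =
      (PySem.List.pyRange 1 (min ((10 : Int) ^ (PySem.Int.floordiv (PySem.Str.len (PySem.Int.toStr maxv)) 2).toNat) (pvStop maxv)) 1).map pvRepF := by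
  unfold generate_repeated_numbers_up_to_py
  rw [if_neg h]
  set K : Int := PySem.Int.floordiv (PySem.Str.len (PySem.Int.toStr maxv)) 2 with hK
  have hK1 : 1 ≤ K := by
    rw [hK, toStr_len maxv (by omega)]
    rw [show ((Nat.log 10 maxv.toNat : Int) + 1) = (((Nat.log 10 maxv.toNat + 1 : ℕ)) : Int) by push_cast; ring]
    rw [show ((2 : Int)) = ((2 : ℕ) : Int) from rfl]
    rw [PySem.Int.floordiv_natCast]
    have : 10 ≤ maxv.toNat := by omega
    have := Nat.log_pos (b := 10) (by norm_num) this
    omega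
  have hinit : ([] : List Int) =
      (PySem.List.pyRange 1 (min ((10 : Int) ^ ((1 : Int) - 1).toNat) (pvStop maxv)) 1).map pvRepF := by
    rw [show ((1 : Int) - 1).toNat = 0 by omega]
    rw [min_eq_left (by simpa using pvStop_pos maxv)]
    rw [PySem.List.pyRange_one_eq_nil (by norm_num)]
    simp
  rw [hinit]
  exact lemAOuter maxv (K + 1 - 1).toNat 1 K (by norm_num) (by omega) (by omega)

-- ==== B characterised ====

-- B's per-element formula agrees with pvRepF on positive left halves
lemma mapF_eq (l : Int) (hl : 1 ≤ l) :
    l * (10 : Int) ^ (PySem.Str.len (PySem.Int.toStr l)).toNat + l = pvRepF l := by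
  rw [toStr_len l hl,
    show ((Nat.log 10 l.toNat : Int) + 1).toNat = Nat.log 10 l.toNat + 1 by omega]
  rfl

-- B's closed-form stop equals the true stopping point clamped to A's outer bound
set_option maxHeartbeats 1000000 in
lemma stop_eq (maxv : Int) (h : ¬ maxv < 11) :
    (if PySem.Int.mod (PySem.Str.len (PySem.Int.toStr maxv)) 2 = 1 then
        (10 : Int) ^ (PySem.Int.floordiv (PySem.Str.len (PySem.Int.toStr maxv)) 2).toNat
      else max ((10 : Int) ^ (PySem.Int.floordiv (PySem.Str.len (PySem.Int.toStr maxv)) 2 - 1).toNat)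
               (PySem.Int.floordiv maxv ((10 : Int) ^ (PySem.Int.floordiv (PySem.Str.len (PySem.Int.toStr maxv)) 2).toNat + 1) + 1)) =
    min ((10 : Int) ^ (PySem.Int.floordiv (PySem.Str.len (PySem.Int.toStr maxv)) 2).toNat) (pvStop maxv) := by
  set L : ℕ := Nat.log 10 maxv.toNat + 1 with hL
  have hlenL : PySem.Str.len (PySem.Int.toStr maxv) = ((L : ℕ) : Int) := by
    rw [toStr_len maxv (by omega)]; push_cast [hL]; ring
  have hfd : PySem.Int.floordiv (PySem.Str.len (PySem.Int.toStr maxv)) 2 = ((L / 2 : ℕ) : Int) := by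
    rw [hlenL]; exact_mod_cast PySem.Int.floordiv_natCast L 2
  have hmd : PySem.Int.mod (PySem.Str.len (PySem.Int.toStr maxv)) 2 = ((L % 2 : ℕ) : Int) := by
    rw [hlenL]; exact_mod_cast PySem.Int.mod_natCast L 2
  have hL2 : 2 ≤ L := by
    have : 10 ≤ maxv.toNat := by omega
    have := Nat.log_pos (b := 10) (by norm_num) this
    omega
  set t : ℕ := L / 2 with ht
  have ht1 : 1 ≤ t := by omega
  rw [hfd, hmd, show (((L / 2 : ℕ) : Int)).toNat = t by omega]
  set P : Int := (10 : Int) ^ t with hP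
  have hPpos : (0 : Int) < P := by positivity
  set Q : Int := (10 : Int) ^ (t - 1) with hQ
  have hQpos : (0 : Int) < Q := by positivity
  have hQP : Q * 10 = P := by
    rw [hQ, hP, ← pow_succ]; congr 1; omega
  have hQ1 : 1 ≤ Q := hQpos
  have hQtoNat : (10 : Int) ^ ((((L / 2 : ℕ) : Int)) - 1).toNat = Q := by
    rw [hQ]; congr 1; omega
  -- digit-count bounds on maxv
  have h_lo : (10 : Int) ^ (L - 1) ≤ maxv := by
    have h1 : 10 ^ (L - 1) ≤ maxv.toNat := by
      rw [hL, show Nat.log 10 maxv.toNat + 1 - 1 = Nat.log 10 maxv.toNat by omega]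
      exact Nat.pow_log_le_self 10 (by omega)
    have : ((10 ^ (L - 1) : ℕ) : Int) ≤ (maxv.toNat : Int) := by exact_mod_cast h1
    push_cast at this
    omega
  have h_hi : maxv < (10 : Int) ^ L := by
    have h1 : maxv.toNat < 10 ^ L := by
      rw [hL]; exact Nat.lt_pow_succ_log_self (by norm_num) maxv.toNat
    have : (maxv.toNat : Int) < ((10 ^ L : ℕ) : Int) := by exact_mod_cast h1
    push_cast at this
    omega
  by_cases hpar : ((L % 2 : ℕ) : Int) = 1
  · -- L odd: L = 2t + 1; every l < P fits, so stop is the outer bound P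
    rw [if_pos hpar]
    have hLodd : L = 2 * t + 1 := by omega
    have hPle : P ≤ pvStop maxv := by
      have hfit : pvRepF (P - 1) ≤ maxv := by
        have hrep : pvRepF (P - 1) = (P - 1) * 10 ^ ((t - 1) + 1) + (P - 1) := by
          apply pvRepF_eq (t - 1) (P - 1)
          · rw [← hQ]; omega
          · rw [show (t - 1) + 1 = t by omega, ← hP]; omega
        rw [show (t - 1) + 1 = t by omega, ← hP] at hrep
        have hPP : P * P ≤ (10 : Int) ^ (L - 1) := by
          rw [hP, ← pow_add, hLodd]
          exact pow_le_pow_right₀ (by norm_num) (by omega)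
        nlinarith
      have := lt_pvStop_of_le maxv (P - 1) (by omega) hfit
      omega
    exact (min_eq_left hPle).symm
  · -- L even: L = 2t; stop is max(Q, maxv // (P + 1) + 1) and equals pvStop
    rw [if_neg hpar]
    have hLev : L = 2 * t := by omega
    rw [hQtoNat]
    set c : Int := PySem.Int.floordiv maxv (P + 1) with hc
    have hcdiv := (PySem.Int.floordiv_eq_iff_of_pos (a := maxv) (b := P + 1) (q := c) (by omega)).mp rfl
    obtain ⟨hc1, hc2⟩ := hcdiv
    have hPP : maxv < P * P := by
      have : (10 : Int) ^ L = P * P := by rw [hP, ← pow_add, hLev]; ring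
      omega
    have hQPle : Q * P ≤ maxv := by
      have : (10 : Int) ^ (L - 1) = Q * P := by
        rw [hQ, hP, ← pow_add]; congr 1; omega
      omega
    have hcP : c < P := by nlinarith
    have hc0 : 0 ≤ c := by nlinarith
    set a : Int := max Q (c + 1) with ha
    have ha1 : 1 ≤ a := le_trans hQ1 (le_max_left _ _)
    have haP : a ≤ P := by
      have : c + 1 ≤ P := by omega
      have : Q ≤ P := by nlinarith
      omega
    -- maxv < pvRepF a
    have hbig : maxv < pvRepF a := by
      by_cases haeq : a = P
      · have hrep : pvRepF P = P * 10 ^ (t + 1) + P :=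
          pvRepF_eq t P (le_refl _) (pow_lt_pow_right₀ (by norm_num) (by omega))
        have h10 : P * 10 ^ (t + 1) = P * P * 10 := by rw [hP, ← pow_add, ← pow_add]; ring
        rw [haeq, hrep]
        nlinarith
      · have haP' : a < P := lt_of_le_of_ne haP haeq
        have hrep : pvRepF a = a * 10 ^ ((t - 1) + 1) + a := by
          apply pvRepF_eq (t - 1) a
          · rw [← hQ]; exact le_max_left _ _
          · rw [show (t - 1) + 1 = t by omega, ← hP]; exact haP'
        rw [show (t - 1) + 1 = t by omega, ← hP] at hrep
        have hac : c + 1 ≤ a := le_max_right _ _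
        nlinarith
    -- a ≤ pvStop
    have hle : a ≤ pvStop maxv := by
      by_cases ha1' : a = 1
      · rw [ha1']; exact pvStop_pos maxv
      · have ha2 : 2 ≤ a := by omega
        have hfit : pvRepF (a - 1) ≤ maxv := by
          by_cases hQc : c + 1 ≤ Q
          · -- a = Q, a - 1 = Q - 1 with t ≥ 2 (Q ≥ 2 since a ≥ 2)
            have haQ : a = Q := by omega
            have hQ2 : 2 ≤ Q := by omega
            have ht2 : 2 ≤ t := by
              by_contra hcon
              have : t = 1 := by omega
              rw [hQ, this] at hQ2
              norm_num at hQ2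
            have hrep : pvRepF (Q - 1) = (Q - 1) * 10 ^ ((t - 2) + 1) + (Q - 1) := by
              apply pvRepF_eq (t - 2) (Q - 1)
              · have : (10 : Int) ^ (t - 2) * 10 = Q := by
                  rw [hQ, ← pow_succ]; congr 1; omega
                have hp : (0 : Int) < (10 : Int) ^ (t - 2) := by positivity
                omega
              · rw [show (t - 2) + 1 = t - 1 by omega, ← hQ]; omega
            rw [show (t - 2) + 1 = t - 1 by omega, ← hQ] at hrep
            rw [haQ, hrep]
            have hQle : Q ≤ P := by nlinarith
            nlinarith
          · -- a = c + 1, a - 1 = c with Q ≤ c < P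
            have hac : a = c + 1 := by omega
            have hQc' : Q ≤ c := by omega
            have hrep : pvRepF c = c * 10 ^ ((t - 1) + 1) + c := by
              apply pvRepF_eq (t - 1) c
              · rw [← hQ]; exact hQc'
              · rw [show (t - 1) + 1 = t by omega, ← hP]; exact hcP
            rw [show (t - 1) + 1 = t by omega, ← hP] at hrep
            rw [hac, show c + 1 - 1 = c by ring, hrep]
            nlinarith
        have := lt_pvStop_of_le maxv (a - 1) (by omega) hfit
        omega
    have hstop : a = pvStop maxv := pvStop_eq_of maxv a ha1 hle hbig
    rw [← hstop]
    exact (min_eq_right haP).symm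

lemma B_eq (maxv : Int) (h : ¬ maxv < 11) :
    generate_repeated_numbers_up_to_py_alt maxv =
      (PySem.List.pyRange 1 (min ((10 : Int) ^ (PySem.Int.floordiv (PySem.Str.len (PySem.Int.toStr maxv)) 2).toNat) (pvStop maxv)) 1).map pvRepF := by
  unfold generate_repeated_numbers_up_to_py_alt
  rw [if_neg h]
  simp only []
  rw [stop_eq maxv h]
  apply List.map_congr_left
  intro l hl
  have h1l : 1 ≤ l := (PySem.List.mem_pyRange_one.mp hl).1
  exact mapF_eq l h1l

-- ===== VERDICT (by name: the statement is the Claim_ definition above) =====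
theorem generate_repeated_numbers_up_to_py_spec : Claim_equal_generate_repeated_numbers_up_to_py := by
  intro maxv _hdom
  unfold Spec_generate_repeated_numbers_up_to_py
  by_cases h : maxv < 11
  · unfold generate_repeated_numbers_up_to_py generate_repeated_numbers_up_to_py_alt
    simp [h]
  · rw [A_eq maxv h, B_eq maxv h]
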